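-- pv_equiv track=rewrite | github.com/lhk6397/Movement-Algorithm-Study | Kimyeojung/[PGS] 부족한 금액 계산하기.py | solution
-- ===== SOURCE A (Python) =====
-- def solution(price, money, count):
--     answer = -1
--     sum_money=0
--
--     for i in range(1, count+1):
--         sum_money+=price*i
--
--     answer=sum_money-money
--     if answer<=0:
--         answer=0
--
--     return answer
-- ===== SOURCE B (Python) =====
-- def solution(price, money, count):
--     n = count if count > 0 else 0
--     shortfall = price * n * (n + 1) // 2 - money
--     return shortfall if shortfall > 0 else 0
-- ===== Notes on version B (the rewrite author's own statement) =====
-- stated objective: faster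
-- what changed: Replaced the O(count) summation loop with the closed-form arithmetic-series formula price*n*(n+1)//2 (n = max(count,0)), clamped at 0.
import Mathlib
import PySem

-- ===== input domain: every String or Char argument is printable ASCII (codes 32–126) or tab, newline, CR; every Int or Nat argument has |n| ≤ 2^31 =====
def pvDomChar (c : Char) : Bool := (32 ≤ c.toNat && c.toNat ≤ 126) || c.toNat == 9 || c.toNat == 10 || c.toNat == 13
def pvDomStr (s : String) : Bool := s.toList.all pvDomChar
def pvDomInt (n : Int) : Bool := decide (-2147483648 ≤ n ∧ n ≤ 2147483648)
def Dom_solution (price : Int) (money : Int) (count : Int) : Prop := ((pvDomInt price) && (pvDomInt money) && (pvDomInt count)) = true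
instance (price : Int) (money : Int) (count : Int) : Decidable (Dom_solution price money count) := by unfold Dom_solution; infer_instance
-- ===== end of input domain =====

-- B replaces A's O(count) summation loop with the closed-form arithmetic series (O(1)).


-- ===== PORT A =====
def solution (price : Int) (money : Int) (count : Int) : Int :=
  let sum_money : Int :=
    (PySem.List.pyRange 1 (count + 1) 1).foldl (fun s i => s + price * i) 0
  let answer := sum_money - money
  if answer ≤ 0 then 0 else answer

-- ===== PORT B =====
def solution_alt (price : Int) (money : Int) (count : Int) : Int :=
  let n : Int := if count > 0 then count else 0
  let shortfall := PySem.Int.floordiv (price * n * (n + 1)) 2 - money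
  if shortfall > 0 then shortfall else 0

-- ===== PRECONDITION & SPEC =====
def Spec_solution (price : Int) (money : Int) (count : Int) (out : Int) : Prop := out = solution_alt price money count
instance (price : Int) (money : Int) (count : Int) (out : Int) : Decidable (Spec_solution price money count out) := by unfold Spec_solution; infer_instance

-- ===== CLAIM (what is proved, stated in full; the proofs are below) =====
def Claim_equal_solution : Prop := ∀ (price : Int) (money : Int) (count : Int), Dom_solution price money count → Spec_solution price money count (solution price money count)

-- ===== LEMMAS AND PROOFS =====

-- the loop sum over range(1, n+1) equals the arithmetic series
theorem pv_sum_range (price : Int) (n : Nat) :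
    (PySem.List.pyRange 1 ((n : Int) + 1) 1).foldl (fun s i => s + price * i) 0
      = price * n * (n + 1) / 2 := by
  induction n with
  | zero => simp [PySem.List.pyRange_one_eq_nil]
  | succ k ih =>
    have h1 : (1 : Int) ≤ (k : Int) + 1 := by omega
    have hc : (((k : Nat) + 1 : Nat) : Int) + 1 = ((k : Int) + 1) + 1 := by push_cast; ring
    rw [hc, PySem.List.pyRange_one_succ_right h1, List.foldl_append, ih]
    simp only [List.foldl]
    have he : (2 : Int) ∣ (k : Int) * ((k : Int) + 1) := Int.even_mul_succ_self k |>.two_dvd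
    obtain ⟨m, hm⟩ := he
    have hm' : ((k : Int) + 1) * (((k : Int) + 1) + 1) = 2 * (m + ((k : Int) + 1)) := by ring_nf; linarith [hm]
    push_cast
    rw [show price * (k : Int) * ((k : Int) + 1) = price * ((k:Int) * ((k:Int)+1)) by ring, hm,
        show price * ((k : Int) + 1) * ((k : Int) + 1 + 1) = price * (((k:Int)+1) * (((k:Int)+1)+1)) by ring, hm']
    rw [Int.mul_ediv_assoc _ ⟨m, rfl⟩, Int.mul_ediv_assoc _ ⟨m + ((k:Int)+1), rfl⟩]
    simp
    ring

theorem pv_fd (x : Int) : PySem.Int.floordiv x 2 = x / 2 := by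
  simp [PySem.Int.floordiv, Int.fdiv_eq_ediv]

-- ===== VERDICT (by name: the statement is the Claim_ definition above) =====
theorem solution_spec : Claim_equal_solution := by
  intro price money count _
  unfold Spec_solution solution solution_alt
  simp only [pv_fd]
  by_cases h : count > 0
  · obtain ⟨n, hn⟩ : ∃ n : Nat, count = (n : Int) :=
      ⟨count.toNat, (Int.toNat_of_nonneg (le_of_lt h)).symm⟩
    subst hn
    rw [pv_sum_range, if_pos h]
    omega
  · rw [PySem.List.pyRange_one_eq_nil (by omega : count + 1 ≤ 1), if_neg h]
    simp only [List.foldl_nil, mul_zero, zero_add, mul_one]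
    omega
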